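-- pv_equiv track=rewrite | github.com/blueskies1818/Agent | engine/plan_manager.py | _replace_steps_section
-- ===== SOURCE A (Python) =====
-- def _replace_steps_section(body: str, new_steps_block: str) -> str:
--     """Replace the content of the ## Steps section in body."""
--     lines     = body.splitlines(keepends=True)
--     out       = []
--     in_steps  = False
--     replaced  = False
--     for line in lines:
--         if line.strip().startswith("## Steps") and not replaced:
--             in_steps = True
--             out.append(line)
--             out.append(new_steps_block)
--             continue
--         if in_steps:
--             if line.strip().startswith("## "):
--                 in_steps = False
--                 replaced = True
--                 out.append(line)
--             # else: skip old step lines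
--         else:
--             out.append(line)
--     return "".join(out)
-- ===== SOURCE B (Python) =====
-- def _replace_steps_section(body: str, new_steps_block: str) -> str:
--     """Replace the content of the ## Steps section in body."""
--     lines = body.splitlines(keepends=True)
--     start = next((i for i, l in enumerate(lines)
--                   if l.strip().startswith("## Steps")), None)
--     if start is None:
--         return body
--     end = next((j for j in range(start + 1, len(lines))
--                 if lines[j].strip().startswith("## ")), len(lines))
--     return "".join(lines[:start + 1]) + new_steps_block + "".join(lines[end:])
-- ===== Notes on version B (the rewrite author's own statement) =====
-- stated objective: alternative
-- what changed: Replaces A's line-by-line state machine (in_steps/replaced flags with an accumulator) by computing the section boundaries first (index of the first '## Steps' header, then the index of the next '## ' header) and assembling the result from slices; Pre_ excludes bodies with chained duplicate '## Steps' headers, where A's re-emission of the block after each duplicate and B's treating the duplicate as the next section's start are both accidental readings of an unspecified duplicate-header corner.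
import Mathlib
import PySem

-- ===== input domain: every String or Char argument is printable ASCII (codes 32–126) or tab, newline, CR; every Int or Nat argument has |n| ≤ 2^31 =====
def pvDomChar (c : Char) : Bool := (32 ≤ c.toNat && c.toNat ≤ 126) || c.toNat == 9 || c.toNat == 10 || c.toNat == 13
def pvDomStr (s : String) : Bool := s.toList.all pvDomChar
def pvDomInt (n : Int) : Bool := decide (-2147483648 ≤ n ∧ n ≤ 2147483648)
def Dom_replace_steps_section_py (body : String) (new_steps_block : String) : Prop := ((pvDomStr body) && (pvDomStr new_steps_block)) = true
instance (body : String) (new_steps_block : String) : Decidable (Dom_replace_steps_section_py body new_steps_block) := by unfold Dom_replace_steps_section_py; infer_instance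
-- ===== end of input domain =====

-- B replaces A's flag state machine by boundary computation + slice assembly ("alternative");
-- Pre_ excludes the chained-duplicate '## Steps' header corner (see its comment).

-- Shared helper: hand port of body.splitlines(keepends=True); exact for the break
-- characters '\n', '\r', '\r\n' — the only line breaks occurring in the ASCII input domain.
-- Tail-recursive scan (`done` = finished lines, reversed; `cur` = current line, reversed).
def pySplitlinesKeepGo (done : List (List Char)) (cur : List Char) : List Char → List (List Char)
  | [] => (if cur = [] then done else cur.reverse :: done).reverse
  | '\n' :: rest => pySplitlinesKeepGo (('\n' :: cur).reverse :: done) [] rest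
  | '\r' :: '\n' :: rest => pySplitlinesKeepGo (('\n' :: '\x0d' :: cur).reverse :: done) [] rest
  | '\x0d' :: rest => pySplitlinesKeepGo (('\x0d' :: cur).reverse :: done) [] rest
  | c :: rest => pySplitlinesKeepGo done (c :: cur) rest

def pySplitlinesKeep (cs : List Char) : List (List Char) := pySplitlinesKeepGo [] [] cs

-- line.strip().startswith("## Steps") / ("## ") — shared by both ports
def isStepsLine (l : List Char) : Bool := PySem.Chars.startswith (PySem.Chars.strip l) "## Steps".toList
def isHdrLine (l : List Char) : Bool := PySem.Chars.startswith (PySem.Chars.strip l) "## ".toList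

-- ===== PORT A =====
-- body of A's for-loop; state = (out, in_steps, replaced)
def aStep (blk : List Char) (st : List (List Char) × Bool × Bool) (line : List Char) :
    List (List Char) × Bool × Bool :=
  if isStepsLine line && !st.2.2 then (st.1 ++ [line, blk], true, st.2.2)
  else if st.2.1 then
    if isHdrLine line then (st.1 ++ [line], false, true) else st
  else (st.1 ++ [line], st.2.1, st.2.2)

def replace_steps_section_py (body : String) (new_steps_block : String) : String :=
  let lines := pySplitlinesKeep body.toList
  String.ofList ((lines.foldl (aStep new_steps_block.toList) ([], false, false)).1).flatten

-- ===== PORT B =====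
def replace_steps_section_py_alt (body : String) (new_steps_block : String) : String :=
  let lines := pySplitlinesKeep body.toList
  match lines.findIdx? isStepsLine with
  | none => body
  | some start =>
    let e := (((lines.drop (start + 1)).findIdx? isHdrLine).map
        (fun k => start + 1 + k)).getD lines.length
    String.ofList ((lines.take (start + 1)).flatten ++ new_steps_block.toList ++
      (lines.drop e).flatten)

-- ===== PRECONDITION & SPEC =====
-- dupStepsHdr: the first '## ' header after the first '## Steps' header is itself another
-- '## Steps' header (chained duplicate section headers).
def dupStepsHdr (body : String) : Bool :=
  match (pySplitlinesKeep body.toList).findIdx? isStepsLine with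
  | none => false
  | some i =>
    match ((pySplitlinesKeep body.toList).drop (i + 1)).dropWhile (fun l => !isHdrLine l) with
    | [] => false
    | l :: _ => isStepsLine l

-- Pre_ excludes bodies with chained duplicate '## Steps' headers, where A re-emits the new
-- block after each duplicate header and keeps consuming while B treats the duplicate as the
-- next section's start: an unspecified duplicate-header corner on which either value is as
-- defensible as the other.
def Pre_replace_steps_section_py (body : String) (new_steps_block : String) : Prop :=
  dupStepsHdr body = false
instance (body : String) (new_steps_block : String) : Decidable (Pre_replace_steps_section_py body new_steps_block) := by
  unfold Pre_replace_steps_section_py; infer_instance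

def pvWitness_replace_steps_section_py : String × String := ("## Steps\nold\n## End\ntail\n", "1. a\n")

def Spec_replace_steps_section_py (body : String) (new_steps_block : String) (out : String) : Prop := out = replace_steps_section_py_alt body new_steps_block
instance (body : String) (new_steps_block : String) (out : String) : Decidable (Spec_replace_steps_section_py body new_steps_block out) := by unfold Spec_replace_steps_section_py; infer_instance

-- ===== CLAIM (what is proved, stated in full; the proofs are below) =====
def Claim_equal_replace_steps_section_py : Prop := ∀ (body : String) (new_steps_block : String), Dom_replace_steps_section_py body new_steps_block → Pre_replace_steps_section_py body new_steps_block → Spec_replace_steps_section_py body new_steps_block (replace_steps_section_py body new_steps_block)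

-- ===== LEMMAS AND PROOFS =====
-- proof-side structural version of pySplitlinesKeep, and the bridge to the tail-recursive scan
def slkSpec : List Char → List (List Char)
  | [] => []
  | '\n' :: rest => ['\n'] :: slkSpec rest
  | '\r' :: '\n' :: rest => ['\x0d', '\n'] :: slkSpec rest
  | '\x0d' :: rest => ['\x0d'] :: slkSpec rest
  | c :: rest =>
    match slkSpec rest with
    | [] => [[c]]
    | l :: ls => (c :: l) :: ls

def slkCons (pre : List Char) : List (List Char) → List (List Char)
  | [] => if pre = [] then [] else [pre]
  | l :: ls => (pre ++ l) :: ls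

theorem slkCons_nil (ls : List (List Char)) : slkCons [] ls = ls := by
  cases ls <;> simp [slkCons]

theorem go_spec (cs : List Char) : ∀ done cur,
    pySplitlinesKeepGo done cur cs = done.reverse ++ slkCons cur.reverse (slkSpec cs) := by
  induction cs using slkSpec.induct with
  | case1 =>
    intro done cur
    by_cases hc : cur = []
    · simp [pySplitlinesKeepGo, slkSpec, slkCons, hc]
    · simp [pySplitlinesKeepGo, slkSpec, slkCons, hc]
  | case2 rest ih =>
    intro done cur
    rw [pySplitlinesKeepGo, ih, slkSpec]
    rw [show ([] : List Char).reverse = [] from rfl, slkCons_nil]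
    simp [slkCons]
  | case3 rest ih =>
    intro done cur
    rw [pySplitlinesKeepGo, ih, slkSpec]
    rw [show ([] : List Char).reverse = [] from rfl, slkCons_nil]
    simp [slkCons]
  | case4 rest hne ih =>
    intro done cur
    rw [pySplitlinesKeepGo.eq_4, ih, slkSpec.eq_4]
    · rw [show ([] : List Char).reverse = [] from rfl, slkCons_nil]
      simp [slkCons]
    · exact hne
    · exact hne
  | case5 c rest h1 h2 h3 hnil ih =>
    intro done cur
    rw [pySplitlinesKeepGo.eq_5 _ _ _ _ h1 h2 h3, ih, slkSpec.eq_5 _ _ h1 h2 h3, hnil]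
    simp [slkCons]
  | case6 c rest h1 h2 h3 l ls hcons ih =>
    intro done cur
    rw [pySplitlinesKeepGo.eq_5 _ _ _ _ h1 h2 h3, ih, slkSpec.eq_5 _ _ h1 h2 h3, hcons]
    simp [slkCons]

theorem pySplitlinesKeep_eq_slkSpec (cs : List Char) : pySplitlinesKeep cs = slkSpec cs := by
  rw [pySplitlinesKeep, go_spec]
  simp [slkCons_nil]

theorem flatten_pySplitlinesKeep (cs : List Char) : (pySplitlinesKeep cs).flatten = cs := by
  rw [pySplitlinesKeep_eq_slkSpec]
  induction cs using slkSpec.induct <;> simp_all [slkSpec]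

-- a '## Steps' line is in particular a '## ' header line
theorem steps_imp_hdr (l : List Char) (h : isStepsLine l = true) : isHdrLine l = true := by
  rw [isStepsLine, PySem.Chars.startswith_iff] at h
  rw [isHdrLine, PySem.Chars.startswith_iff]
  exact List.IsPrefix.trans (by decide) h

theorem foldl_done (blk : List Char) (ls : List (List Char)) (out : List (List Char)) :
    List.foldl (aStep blk) (out, false, true) ls = (out ++ ls, false, true) := by
  induction ls generalizing out with
  | nil => simp
  | cons l t ih => simp [aStep, ih]

-- in_steps scan: A skips until a '## ' header that is not itself a '## Steps' header,
-- re-emitting [line, blk] at every chained '## Steps' header on the way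
theorem foldl_skip (blk : List Char) (ls : List (List Char)) (out : List (List Char)) :
    (List.foldl (aStep blk) (out, true, false) ls).1 =
      out ++ ((ls.takeWhile (fun l => !(isHdrLine l && !isStepsLine l))).flatMap
               (fun l => if isStepsLine l then [l, blk] else []))
          ++ ls.dropWhile (fun l => !(isHdrLine l && !isStepsLine l)) := by
  induction ls generalizing out with
  | nil => simp
  | cons l t ih =>
    by_cases hS : isStepsLine l = true
    · have h1 : aStep blk (out, true, false) l = (out ++ [l, blk], true, false) := by
        simp [aStep, hS]
      rw [List.foldl_cons, h1, ih]
      simp [hS]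
    · by_cases hH : isHdrLine l = true
      · have h1 : aStep blk (out, true, false) l = (out ++ [l], false, true) := by
          simp [aStep, hS, hH]
        rw [List.foldl_cons, h1, foldl_done]
        simp [hH, hS]
      · have h1 : aStep blk (out, true, false) l = (out, true, false) := by
          simp [aStep, hS, hH]
        rw [List.foldl_cons, h1, ih]
        simp [hH, hS]

theorem aStep_out (blk : List Char) (ls : List (List Char)) (out : List (List Char)) (i r : Bool) :
    List.foldl (aStep blk) (out, i, r) ls =
      (out ++ (List.foldl (aStep blk) ([], i, r) ls).1, (List.foldl (aStep blk) ([], i, r) ls).2) := by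
  induction ls generalizing out i r with
  | nil => simp
  | cons l t ih =>
    simp only [List.foldl_cons]
    have hs : aStep blk (out, i, r) l = (out ++ (aStep blk ([], i, r) l).1, (aStep blk ([], i, r) l).2) := by
      simp only [aStep]
      split_ifs <;> simp
    rw [hs, ih, ih ((aStep blk ([], i, r) l).1)]
    rcases h : aStep blk ([], i, r) l with ⟨o, i', r'⟩
    simp [List.append_assoc]

theorem drop_findIdx?_getD {α : Type} (p : α → Bool) (ls : List α) :
    ls.drop ((ls.findIdx? p).getD ls.length) = ls.dropWhile (fun x => !p x) := by
  induction ls with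
  | nil => simp
  | cons x t ih =>
    by_cases hp : p x = true
    · simp [List.findIdx?_cons, hp]
    · simp only [List.findIdx?_cons, if_neg hp, List.dropWhile_cons]
      cases hf : t.findIdx? p with
      | none =>
        rw [hf] at ih
        simp only [Option.getD_none, List.drop_length] at ih
        simp [hp, ← ih, List.drop_length]
      | some k =>
        rw [hf] at ih
        simp [hp, ← ih]

theorem foldl_main (blk : List Char) (lines : List (List Char)) :
    (List.foldl (aStep blk) ([], false, false) lines).1 =
      match lines.findIdx? isStepsLine with
      | none => lines
      | some i => lines.take (i + 1) ++ [blk] ++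
          (((lines.drop (i + 1)).takeWhile (fun l => !(isHdrLine l && !isStepsLine l))).flatMap
             (fun l => if isStepsLine l then [l, blk] else [])) ++
          (lines.drop (i + 1)).dropWhile (fun l => !(isHdrLine l && !isStepsLine l)) := by
  induction lines with
  | nil => simp
  | cons l rest ih =>
    by_cases hS : isStepsLine l = true
    · have hf : (l :: rest).findIdx? isStepsLine = some 0 := by
        simp [List.findIdx?_cons, hS]
      have h1 : aStep blk ([], false, false) l = ([l, blk], true, false) := by
        simp [aStep, hS]
      rw [List.foldl_cons, h1, foldl_skip, hf]
      dsimp only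
      have e0 : List.drop (0 + 1) (l :: rest) = rest := rfl
      rw [e0]
      simp
    · have hf : (l :: rest).findIdx? isStepsLine = Option.map (· + 1) (rest.findIdx? isStepsLine) := by
        simp [List.findIdx?_cons, hS]
      have h1 : aStep blk ([], false, false) l = ([l], false, false) := by
        simp [aStep, hS]
      rw [List.foldl_cons, h1, aStep_out, ih]
      cases hfr : rest.findIdx? isStepsLine with
      | none =>
        rw [hfr] at hf
        simp only [Option.map_none] at hf
        rw [hf]
        simp
      | some i =>
        rw [hfr] at hf
        simp only [Option.map_some] at hf
        rw [hf]
        dsimp only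
        simp [List.take_succ_cons, List.drop_succ_cons]

-- outside D_, nothing before the terminator is a header at all, so the two while-regions agree
theorem region_eq (ls : List (List Char))
    (hD : ∀ l t, ls.dropWhile (fun l => !isHdrLine l) = l :: t → isStepsLine l = false) :
    ls.takeWhile (fun l => !(isHdrLine l && !isStepsLine l)) = ls.takeWhile (fun l => !isHdrLine l) ∧
    ls.dropWhile (fun l => !(isHdrLine l && !isStepsLine l)) = ls.dropWhile (fun l => !isHdrLine l) := by
  induction ls with
  | nil => simp
  | cons l t ih =>
    by_cases hH : isHdrLine l = true
    · have hS : isStepsLine l = false := by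
        apply hD l t
        simp [List.dropWhile_cons, hH]
      constructor <;> simp [List.takeWhile_cons, List.dropWhile_cons, hH, hS]
    · have hS : isStepsLine l = false := by
        cases h : isStepsLine l
        · rfl
        · exact absurd (steps_imp_hdr l h) (by simp [hH])
      have hD' : ∀ l' t', t.dropWhile (fun l => !isHdrLine l) = l' :: t' → isStepsLine l' = false := by
        intro l' t' he
        apply hD l' t'
        simpa [List.dropWhile_cons, hH] using he
      obtain ⟨h1, h2⟩ := ih hD'
      have hHf : isHdrLine l = false := by
        cases h : isHdrLine l
        · rfl
        · exact absurd h hH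
      constructor
      · rw [List.takeWhile_cons, List.takeWhile_cons, if_pos, if_pos, h1]
        · simp [hHf]
        · simp [hHf]
      · rw [List.dropWhile_cons, List.dropWhile_cons, if_pos, if_pos, h2]
        · simp [hHf]
        · simp [hHf]

-- inside the takeWhile region there is no header, hence no Steps line, hence no emission
theorem emit_nil (blk : List Char) (ls : List (List Char)) :
    ((ls.takeWhile (fun l => !isHdrLine l)).flatMap
       (fun l => if isStepsLine l then [l, blk] else [])) = [] := by
  induction ls with
  | nil => simp
  | cons l t ih =>
    by_cases hH : isHdrLine l = true
    · simp [List.takeWhile_cons, hH]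
    · have hS : isStepsLine l = false := by
        cases h : isStepsLine l
        · rfl
        · exact absurd (steps_imp_hdr l h) (by simp [hH])
      simp [List.takeWhile_cons, hH, hS, ih]

-- ===== VERDICT (by name: the statements are the Claim_ definitions above) =====
theorem replace_steps_section_py_spec : Claim_equal_replace_steps_section_py := by
  intro body blk _ hnD
  unfold Spec_replace_steps_section_py
  unfold replace_steps_section_py replace_steps_section_py_alt
  dsimp only
  rw [foldl_main]
  cases hf : (pySplitlinesKeep body.toList).findIdx? isStepsLine with
  | none =>
    dsimp only
    rw [flatten_pySplitlinesKeep, String.ofList_toList]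
  | some i =>
    dsimp only
    have hD' : ∀ l t, ((pySplitlinesKeep body.toList).drop (i + 1)).dropWhile (fun l => !isHdrLine l) = l :: t → isStepsLine l = false := by
      intro l t he
      unfold Pre_replace_steps_section_py at hnD
      have hflag := hnD
      unfold dupStepsHdr at hflag
      rw [hf] at hflag
      simp only [he] at hflag
      exact hflag
    obtain ⟨h1, h2⟩ := region_eq _ hD'
    rw [h1, h2, emit_nil]
    have hdw := drop_findIdx?_getD isHdrLine ((pySplitlinesKeep body.toList).drop (i + 1))
    cases hk : ((pySplitlinesKeep body.toList).drop (i + 1)).findIdx? isHdrLine with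
    | none =>
      rw [hk] at hdw
      simp only [Option.getD_none, List.drop_length] at hdw
      simp only [Option.map_none, Option.getD_none]
      rw [← hdw]
      simp [List.flatten_append, List.drop_length, List.drop_drop]
    | some k =>
      rw [hk] at hdw
      simp only [Option.getD_some] at hdw
      simp only [Option.map_some, Option.getD_some]
      rw [List.drop_drop] at hdw
      rw [← hdw]
      simp [List.flatten_append]
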